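-- pv_equiv track=rewrite | github.com/LazZDev/Arrays_To_Do_1 | arrays.py | skyline_heights
-- ===== SOURCE A (Python) =====
-- def skyline_heights(arr):
--     visible_buildings = []
--     max_height = 0
--     for height in reversed(arr):
--         if height > max_height:
--             visible_buildings.append(height)
--             max_height = height
--     return list(reversed(visible_buildings))
-- ===== SOURCE B (Python) =====
-- def skyline_heights(arr):
--     n = len(arr)
--     suffmax = [0] * (n + 1)
--     for i in range(n - 1, -1, -1):
--         suffmax[i] = max(arr[i], suffmax[i + 1])
--     return [arr[i] for i in range(n) if arr[i] > suffmax[i + 1]]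
-- ===== Notes on version B (the rewrite author's own statement) =====
-- stated objective: alternative
-- what changed: Replaces A's single reversed pass with a running max (plus a final reversal) by a suffix-maximum table built once and a forward filter pass that emits the result already in original order, with no reversal.
import Mathlib
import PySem

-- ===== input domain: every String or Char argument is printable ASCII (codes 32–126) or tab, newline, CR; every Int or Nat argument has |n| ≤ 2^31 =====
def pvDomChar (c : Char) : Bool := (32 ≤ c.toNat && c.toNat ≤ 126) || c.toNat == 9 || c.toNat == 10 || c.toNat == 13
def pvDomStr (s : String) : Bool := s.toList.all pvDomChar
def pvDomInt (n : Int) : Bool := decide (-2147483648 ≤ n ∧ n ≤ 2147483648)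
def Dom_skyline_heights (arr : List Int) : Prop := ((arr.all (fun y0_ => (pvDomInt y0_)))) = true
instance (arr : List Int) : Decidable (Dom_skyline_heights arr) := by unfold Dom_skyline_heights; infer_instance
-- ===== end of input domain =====

-- B replaces A's reversed running-max pass (plus final reversal) with a suffix-maximum
-- table built once and a forward filter pass that emits the result in original order.

-- ===== PORT A =====
-- fold over reversed arr with state (visible_buildings, max_height); append = ++ [h]
def skyline_heights (arr : List Int) : List Int :=
  let s := arr.reverse.foldl
    (fun (s : List Int × Int) h => if h > s.2 then (s.1 ++ [h], h) else s) ([], 0)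
  s.1.reverse

-- ===== PORT B =====
-- suffix-maximum table: suffTable arr has length n+1, entry i = max(arr[i:]) floored at 0,
-- built right-to-left as Source B's loop does
def suffTable : List Int → List Int
  | [] => [0]
  | x :: l =>
    let t := suffTable l
    max x (t.headD 0) :: t

def skyline_heights_alt (arr : List Int) : List Int :=
  (arr.zip (suffTable arr).tail).filterMap
    (fun p => if p.1 > p.2 then some p.1 else none)

-- ===== PRECONDITION & SPEC =====
def Spec_skyline_heights (arr : List Int) (out : List Int) : Prop := out = skyline_heights_alt arr
instance (arr : List Int) (out : List Int) : Decidable (Spec_skyline_heights arr out) := by unfold Spec_skyline_heights; infer_instance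

-- ===== CLAIM (what is proved, stated in full; the proofs are below) =====
def Claim_equal_skyline_heights : Prop := ∀ (arr : List Int), Dom_skyline_heights arr → Spec_skyline_heights arr (skyline_heights arr)

-- ===== LEMMAS AND PROOFS =====

-- max of a list floored at 0
def mlist : List Int → Int
  | [] => 0
  | x :: l => max x (mlist l)

-- reference result, built back-to-front like A's visible_buildings
def gref : List Int → List Int
  | [] => []
  | x :: l => if x > mlist l then gref l ++ [x] else gref l

theorem headD_suffTable (l : List Int) : (suffTable l).head?.getD 0 = mlist l := by
  induction l with
  | nil => simp [suffTable, mlist]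
  | cons x l ih => simp [suffTable, mlist, ih]

theorem loop_eq (l : List Int) :
    l.reverse.foldl
      (fun (s : List Int × Int) h => if h > s.2 then (s.1 ++ [h], h) else s) ([], 0)
      = (gref l, mlist l) := by
  induction l with
  | nil => simp [gref, mlist]
  | cons x l ih =>
    simp only [List.reverse_cons, List.foldl_append, ih, List.foldl_cons, List.foldl_nil]
    by_cases h : x > mlist l
    · simp [gref, mlist, h, max_eq_left (le_of_lt h)]
    · simp [gref, mlist, h, max_eq_right (le_of_not_gt h)]

theorem A_eq_gref (l : List Int) : skyline_heights l = (gref l).reverse := by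
  unfold skyline_heights
  simp only [loop_eq]

theorem B_rec (x : Int) (l : List Int) :
    skyline_heights_alt (x :: l)
      = (if x > mlist l then [x] else []) ++ skyline_heights_alt l := by
  cases l with
  | nil =>
    simp only [skyline_heights_alt, suffTable, mlist]
    by_cases h : x > 0 <;> simp [h]
  | cons y l' =>
    have hh : (suffTable l').head?.getD 0 = mlist l' := headD_suffTable _
    simp only [skyline_heights_alt, suffTable, List.headD_eq_head?, List.tail_cons,
      List.zip_cons_cons, List.filterMap_cons, hh]
    by_cases h : x > mlist (y :: l') <;>
      simp only [mlist] at h ⊢ <;> simp [h]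

theorem gref_reverse_eq_alt (l : List Int) :
    (gref l).reverse = skyline_heights_alt l := by
  induction l with
  | nil => simp [gref, skyline_heights_alt, suffTable]
  | cons x l ih =>
    rw [B_rec]
    by_cases h : x > mlist l <;> simp [gref, h, ih]

-- ===== VERDICT (by name: the statement is the Claim_ definition above) =====
theorem skyline_heights_spec : Claim_equal_skyline_heights := by
  intro arr _
  unfold Spec_skyline_heights
  rw [A_eq_gref, gref_reverse_eq_alt]
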